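-- pv_equiv track=rewrite | github.com/harish00078/ReactFireWind | fix_jsx.py | remove_generics
-- ===== SOURCE A (Python) =====
-- def remove_generics(content):
--     result = []
--     i = 0
--     while i < len(content):
--         if content[i:i+16] == 'React.forwardRef':
--             result.append('React.forwardRef')
--             i += 16
--             # Check if next char is < (ignoring whitespace)
--             j = i
--             while j < len(content) and content[j].isspace():
--                 j += 1
--
--             if j < len(content) and content[j] == '<':
--                 # Skip the generic part
--                 depth = 1
--                 j += 1
--                 while j < len(content) and depth > 0:
--                     if content[j] == '<':
--                         depth += 1
--                     elif content[j] == '>':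
--                         depth -= 1
--                     j += 1
--                 i = j
--             else:
--                 # No generic part, continue normally
--                 pass
--         else:
--             result.append(content[i])
--             i += 1
--     return "".join(result)
-- ===== SOURCE B (Python) =====
-- MARKER = 'React.forwardRef'
--
-- def _skip_generic(content, pos):
--     n = len(content)
--     j = pos
--     while j < n and content[j].isspace():
--         j += 1
--     if j < n and content[j] == '<':
--         depth = 1
--         j += 1
--         while j < n and depth > 0:
--             if content[j] == '<':
--                 depth += 1
--             elif content[j] == '>':
--                 depth -= 1
--             j += 1
--         return j
--     return pos
--
-- def remove_generics(content):
--     n = len(content)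
--     starts = [i for i in range(n) if content.startswith(MARKER, i)]
--     out = []
--     last = 0
--     for s in starts:
--         if s < last:
--             continue  # this occurrence lies inside a generic that was skipped
--         out.append(content[last:s])
--         out.append(MARKER)
--         last = _skip_generic(content, s + len(MARKER))
--     out.append(content[last:])
--     return ''.join(out)
-- ===== Notes on version B (the rewrite author's own statement) =====
-- stated objective: faster
-- what changed: B is staged: a first pass collects all marker match positions with str.startswith, then a fold over that position list (skipping positions swallowed by a skipped generic) emits bulk slices, instead of A's single character-by-character walk that builds and compares a 16-char slice at every index and appends one char at a time.
import Mathlib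
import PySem

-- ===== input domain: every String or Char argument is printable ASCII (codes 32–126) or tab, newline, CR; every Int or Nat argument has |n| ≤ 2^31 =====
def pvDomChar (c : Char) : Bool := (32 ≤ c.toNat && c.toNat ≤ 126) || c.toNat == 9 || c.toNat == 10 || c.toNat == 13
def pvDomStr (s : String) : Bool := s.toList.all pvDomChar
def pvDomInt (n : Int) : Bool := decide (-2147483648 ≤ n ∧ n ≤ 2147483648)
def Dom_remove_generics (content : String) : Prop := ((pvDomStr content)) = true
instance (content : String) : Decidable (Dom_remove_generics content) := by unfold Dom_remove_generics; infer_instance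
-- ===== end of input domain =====

-- B replaces A's single character-by-character walk by a staged algorithm: first collect
-- all marker match positions, then fold over that list emitting bulk slices; objective: alternative.

-- The marker string 'React.forwardRef', as a char list (the literal in both Pythons).
def pvRFR : List Char :=
  ['R','e','a','c','t','.','f','o','r','w','a','r','d','R','e','f']

-- ===== PORT A =====
-- A's inner loop 'while j < len(content) and depth > 0: …' walking the suffix at j
-- (d is the depth; the suffix at the loop's final j is returned).
def pvScanA : List Char → Nat → List Char
  | cs, 0 => cs
  | [], _ + 1 => []
  | c :: t, d + 1 => pvScanA t (if c = '<' then d + 2 else if c = '>' then d else d + 1)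

-- A's whitespace skip after a match, then the '<' test; returns the suffix where i resumes
-- (the original suffix when the next non-space char is not '<').
def pvSkipA (cs : List Char) : List Char :=
  match cs.dropWhile (fun c => PySem.Chars.isspace c) with
  | c :: t => if c = '<' then pvScanA t 1 else cs
  | [] => cs

theorem pvScanA_length : ∀ (cs : List Char) (d : Nat), (pvScanA cs d).length ≤ cs.length := by
  intro cs
  induction cs with
  | nil => intro d; cases d <;> simp [pvScanA]
  | cons c t ih =>
    intro d
    cases d with
    | zero => simp [pvScanA]
    | succ d =>
      simp only [pvScanA, List.length_cons]
      exact Nat.le_trans (ih _) (Nat.le_succ _)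

theorem pvSkipA_length (cs : List Char) : (pvSkipA cs).length ≤ cs.length := by
  unfold pvSkipA
  have hd : (cs.dropWhile (fun c => PySem.Chars.isspace c)).length ≤ cs.length :=
    List.length_dropWhile_le _ _
  split
  · next c t heq =>
    split
    · have h1 := pvScanA_length t 1
      rw [heq] at hd
      simp at hd
      omega
    · exact Nat.le_refl _
  · exact Nat.le_refl _

-- A: while i < len(content): compare content[i:i+16]; on match emit the marker and jump
-- (suffix recursion ≙ the index loop; content[i:] is the suffix).
def pvGoA : List Char → List Char
  | [] => []
  | c :: t =>
    if (c :: t).take 16 = pvRFR then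
      pvRFR ++ pvGoA (pvSkipA ((c :: t).drop 16))
    else
      c :: pvGoA t
termination_by cs => cs.length
decreasing_by
  · have h1 := pvSkipA_length ((c :: t).drop 16)
    simp [List.length_drop] at h1 ⊢
    omega
  · simp

def remove_generics (content : String) : String :=
  String.ofList (pvGoA content.toList)

-- ===== PORT B =====
-- B works with INDICES into the fixed string, not suffixes.
-- 'while j < n and content[j].isspace(): j += 1' — first non-space index ≥ j.
def pvWsFrom (cs : List Char) (j : Nat) : Nat :=
  if h : j < cs.length then
    if PySem.Chars.isspace cs[j] then pvWsFrom cs (j + 1) else j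
  else j
termination_by cs.length - j

-- depth update 'if content[j] == '<': depth += 1 elif …'
def pvNewDepth (c : Char) (d : Nat) : Nat :=
  if c = '<' then d + 1 else if c = '>' then d - 1 else d

-- 'while j < n and depth > 0: …' — the final index of the depth-counted scan from j.
def pvDepthFrom (cs : List Char) (j d : Nat) : Nat :=
  if h : j < cs.length then
    if 0 < d then pvDepthFrom cs (j + 1) (pvNewDepth cs[j] d) else j
  else j
termination_by cs.length - j

-- _skip_generic(content, pos): the index where processing resumes after a match.
def pvIdxSkip (cs : List Char) (pos : Nat) : Nat :=
  if h : pvWsFrom cs pos < cs.length then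
    if cs[pvWsFrom cs pos] = '<' then pvDepthFrom cs (pvWsFrom cs pos + 1) 1 else pos
  else pos

-- the for-loop over the collected start positions, state = (parts emitted so far, last);
-- 'continue' for positions swallowed by a skipped generic; finally the tail slice.
-- content[last:s] with 0 ≤ last ≤ s ≤ n is exactly (drop last).take (s - last).
def pvLoopB (cs : List Char) : List Nat → Nat → List Char
  | [], last => cs.drop last
  | s :: rest, last =>
    if s < last then pvLoopB cs rest last
    else (cs.drop last).take (s - last) ++ pvRFR ++ pvLoopB cs rest (pvIdxSkip cs (s + 16))

-- starts = [i for i in range(n) if content.startswith(MARKER, i)]; then the fold from last = 0.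
def remove_generics_alt (content : String) : String :=
  String.ofList (pvLoopB content.toList
    ((List.range content.toList.length).filter
      (fun i => decide ((content.toList.drop i).take 16 = pvRFR))) 0)

-- ===== PRECONDITION & SPEC =====
def Spec_remove_generics (content : String) (out : String) : Prop := out = remove_generics_alt content
instance (content : String) (out : String) : Decidable (Spec_remove_generics content out) := by unfold Spec_remove_generics; infer_instance

-- ===== CLAIM =====
def Claim_equal_remove_generics : Prop := ∀ (content : String), Dom_remove_generics content → Spec_remove_generics content (remove_generics content)

-- ===== LEMMAS AND PROOFS =====

-- the marker starts at index i
def pvIsM (cs : List Char) (i : Nat) : Prop := (cs.drop i).take 16 = pvRFR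

theorem pvIsM_lt (cs : List Char) (i : Nat) (h : pvIsM cs i) : i < cs.length := by
  by_contra hn
  have hnil : cs.drop i = [] := List.drop_eq_nil_of_le (by omega)
  unfold pvIsM at h
  rw [hnil] at h
  simp [pvRFR] at h

-- the index-based helpers of B compute the same suffixes as A's suffix-based ones
theorem pvWsFrom_ge (cs : List Char) (j : Nat) : j ≤ pvWsFrom cs j := by
  fun_induction pvWsFrom <;> omega

theorem pvWsFrom_drop (cs : List Char) (j : Nat) :
    cs.drop (pvWsFrom cs j) = (cs.drop j).dropWhile (fun c => PySem.Chars.isspace c) := by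
  fun_induction pvWsFrom with
  | case1 j hj hs ih =>
    rw [ih]
    have hcons : cs.drop j = cs[j] :: cs.drop (j + 1) := List.drop_eq_getElem_cons hj
    rw [hcons, List.dropWhile_cons_of_pos (by simpa using hs)]
  | case2 j hj hs =>
    have hcons : cs.drop j = cs[j] :: cs.drop (j + 1) := List.drop_eq_getElem_cons hj
    conv_rhs => rw [hcons, List.dropWhile_cons_of_neg (by simpa using hs)]
    rw [hcons]
  | case3 j hj =>
    have hnil : cs.drop j = [] := List.drop_eq_nil_of_le (by omega)
    rw [hnil]
    simp

theorem pvDepthFrom_ge (cs : List Char) (j d : Nat) : j ≤ pvDepthFrom cs j d := by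
  fun_induction pvDepthFrom <;> omega

theorem pvDepthFrom_drop (cs : List Char) (j d : Nat) :
    cs.drop (pvDepthFrom cs j d) = pvScanA (cs.drop j) d := by
  fun_induction pvDepthFrom with
  | case1 j d hj hd ih =>
    rw [ih]
    have hcons : cs.drop j = cs[j] :: cs.drop (j + 1) := List.drop_eq_getElem_cons hj
    obtain ⟨d', rfl⟩ : ∃ d', d = d' + 1 := ⟨d - 1, by omega⟩
    rw [hcons]
    simp only [pvScanA, pvNewDepth]
    split_ifs <;> rfl
  | case2 j d hj hd =>
    have hd0 : d = 0 := by omega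
    subst hd0
    simp [pvScanA]
  | case3 j d hj =>
    have hnil : cs.drop j = [] := List.drop_eq_nil_of_le (by omega)
    rw [hnil]
    cases d <;> simp [pvScanA]

theorem pvIdxSkip_ge (cs : List Char) (pos : Nat) : pos ≤ pvIdxSkip cs pos := by
  unfold pvIdxSkip
  have h1 := pvWsFrom_ge cs pos
  have h2 := pvDepthFrom_ge cs (pvWsFrom cs pos + 1) 1
  split
  · split <;> omega
  · exact Nat.le_refl _

theorem pvSkipA_of_cons (cs : List Char) (c : Char) (t : List Char)
    (h : cs.dropWhile (fun c => PySem.Chars.isspace c) = c :: t) :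
    pvSkipA cs = if c = '<' then pvScanA t 1 else cs := by
  unfold pvSkipA
  rw [h]

theorem pvSkipA_of_nil (cs : List Char)
    (h : cs.dropWhile (fun c => PySem.Chars.isspace c) = []) :
    pvSkipA cs = cs := by
  unfold pvSkipA
  rw [h]

theorem pvIdxSkip_drop (cs : List Char) (pos : Nat) :
    cs.drop (pvIdxSkip cs pos) = pvSkipA (cs.drop pos) := by
  have hws := pvWsFrom_drop cs pos
  unfold pvIdxSkip
  rcases Nat.lt_or_ge (pvWsFrom cs pos) cs.length with hj | hj
  · have hcons : cs.drop (pvWsFrom cs pos)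
        = cs[pvWsFrom cs pos] :: cs.drop (pvWsFrom cs pos + 1) :=
      List.drop_eq_getElem_cons hj
    have hdw : (cs.drop pos).dropWhile (fun c => PySem.Chars.isspace c)
        = cs[pvWsFrom cs pos] :: cs.drop (pvWsFrom cs pos + 1) := by
      rw [← hws, hcons]
    rw [pvSkipA_of_cons _ _ _ hdw, dif_pos hj]
    by_cases hlt : cs[pvWsFrom cs pos] = '<'
    · rw [if_pos hlt, if_pos hlt, pvDepthFrom_drop]
    · rw [if_neg hlt, if_neg hlt]
  · have hdw : (cs.drop pos).dropWhile (fun c => PySem.Chars.isspace c) = [] := by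
      rw [← hws]
      exact List.drop_eq_nil_of_le hj
    rw [pvSkipA_of_nil _ hdw, dif_neg (by omega)]

-- A leaves a marker-free suffix unchanged
theorem pvGoA_no_marker (cs : List Char) :
    ∀ (n a : Nat), cs.length ≤ a + n → (∀ i, a ≤ i → ¬ pvIsM cs i) →
      pvGoA (cs.drop a) = cs.drop a := by
  intro n
  induction n with
  | zero =>
    intro a h _
    rw [List.drop_eq_nil_of_le (by omega)]
    simp [pvGoA]
  | succ n ih =>
    intro a h hno
    rcases Nat.lt_or_ge a cs.length with ha | ha
    · have hcons : cs.drop a = cs[a] :: cs.drop (a + 1) := List.drop_eq_getElem_cons ha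
      rw [hcons, pvGoA]
      have hm : ¬ (cs[a] :: cs.drop (a + 1)).take 16 = pvRFR := by
        have := hno a (Nat.le_refl a)
        unfold pvIsM at this
        rwa [hcons] at this
      rw [if_neg hm]
      rw [ih (a + 1) (by omega) (fun i hi => hno i (by omega))]
    · rw [List.drop_eq_nil_of_le ha]
      simp [pvGoA]

-- A's walk from a to the first marker position m: copies the slice, emits the marker, jumps
theorem pvGoA_walk (cs : List Char) (m : Nat) (hm : pvIsM cs m) :
    ∀ (k a : Nat), m - a = k → a ≤ m → (∀ i, a ≤ i → i < m → ¬ pvIsM cs i) →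
    pvGoA (cs.drop a) =
      (cs.drop a).take (m - a) ++ pvRFR ++ pvGoA (pvSkipA (cs.drop (m + 16))) := by
  intro k
  induction k with
  | zero =>
    intro a hk ha _
    have hma : a = m := by omega
    subst hma
    have hlt : a < cs.length := pvIsM_lt cs a hm
    have hcons : cs.drop a = cs[a] :: cs.drop (a + 1) := List.drop_eq_getElem_cons hlt
    rw [hcons, pvGoA]
    have hmm : (cs[a] :: cs.drop (a + 1)).take 16 = pvRFR := by
      unfold pvIsM at hm; rwa [hcons] at hm
    rw [if_pos hmm]
    simp
  | succ k ihk =>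
    intro a hk ha hno
    have hlt : a < cs.length := by
      have := pvIsM_lt cs m hm
      omega
    have hcons : cs.drop a = cs[a] :: cs.drop (a + 1) := List.drop_eq_getElem_cons hlt
    rw [hcons, pvGoA]
    have hnm : ¬ (cs[a] :: cs.drop (a + 1)).take 16 = pvRFR := by
      have := hno a (Nat.le_refl a) (by omega)
      unfold pvIsM at this
      rwa [hcons] at this
    rw [if_neg hnm]
    rw [ihk (a + 1) (by omega) (by omega) (fun i hi h2 => hno i (by omega) h2)]
    have htake : (cs[a] :: cs.drop (a + 1)).take (m - a)
        = cs[a] :: (cs.drop (a + 1)).take (m - (a + 1)) := by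
      have h1 : m - a = (m - (a + 1)) + 1 := by omega
      rw [h1, List.take_succ_cons]
    rw [htake]
    simp

-- B's fold over any sorted list of marker positions that contains every marker ≥ last
-- computes A's result on the suffix at last
theorem pvLoopB_eq (cs : List Char) :
    ∀ (ps : List Nat) (last : Nat),
      List.Pairwise (· < ·) ps →
      (∀ p ∈ ps, pvIsM cs p) →
      (∀ m, pvIsM cs m → last ≤ m → m ∈ ps) →
      pvLoopB cs ps last = pvGoA (cs.drop last) := by
  intro ps
  induction ps with
  | nil =>
    intro last _ _ hall
    rw [pvLoopB]
    rw [pvGoA_no_marker cs cs.length last (by omega)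
      (fun i hi hM => by simpa using hall i hM hi)]
  | cons s rest ih =>
    intro last hpw hmem hall
    have hpw' : List.Pairwise (· < ·) rest := hpw.of_cons
    have hgt : ∀ p ∈ rest, s < p := fun p hp => List.rel_of_pairwise_cons hpw hp
    rw [pvLoopB]
    split
    · next hlt =>
      apply ih last hpw' (fun p hp => hmem p (List.mem_cons_of_mem _ hp))
      intro m hM hge
      rcases List.mem_cons.mp (hall m hM hge) with rfl | h
      · omega
      · exact h
    · next hge =>
      have hsle : last ≤ s := by omega
      have hsM : pvIsM cs s := hmem s List.mem_cons_self
      have hfirst : ∀ i, last ≤ i → i < s → ¬ pvIsM cs i := by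
        intro i hi1 hi2 hM
        rcases List.mem_cons.mp (hall i hM hi1) with rfl | h
        · omega
        · exact absurd (hgt i h) (by omega)
      rw [pvGoA_walk cs s hsM (s - last) last rfl hsle hfirst]
      rw [← pvIdxSkip_drop]
      rw [ih (pvIdxSkip cs (s + 16)) hpw' (fun p hp => hmem p (List.mem_cons_of_mem _ hp))]
      intro m hM hge'
      have hs16 : s + 16 ≤ pvIdxSkip cs (s + 16) := pvIdxSkip_ge cs (s + 16)
      rcases List.mem_cons.mp (hall m hM (by omega)) with rfl | h
      · omega
      · exact h

-- ===== VERDICT =====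
theorem remove_generics_spec : Claim_equal_remove_generics := by
  intro content _
  unfold Spec_remove_generics remove_generics remove_generics_alt
  congr 1
  rw [pvLoopB_eq]
  · simp
  · exact List.pairwise_lt_range.filter _
  · intro p hp
    have := (List.mem_filter.mp hp).2
    unfold pvIsM
    exact of_decide_eq_true this
  · intro m hM _
    refine List.mem_filter.mpr ⟨List.mem_range.mpr (pvIsM_lt _ m hM), ?_⟩
    exact decide_eq_true hM
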